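/- GENERATED by tools/from_farm_form.py from prooffarm-gif/accepted/DGifDecompressInput.1/Proof.lean (a worked proof of the farm's unit `DGifDecompressInput.1`,
   accepted by the verdict) — do not edit. -/
import Gif.Spec.Units.DGifDecompressInput_1
import Gif.Spec.AllSegs

open X86 X86.User Asan ProgX.Base ProgX.Base.Spec Gif.Spec

set_option maxRecDepth 4000
set_option maxHeartbeats 4000000

namespace Gif.Spec.DGifDecompressInput_1

/-- **The test of l.1078 cannot fire** (`cmp DWORD PTR [rbx+0x18], 12 ; jg`): `h` is the walker's branch fact of the taken arm for a
loaded `RunningBits = b`, which `LZOK.bits_hi` bounds by 12. -/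
theorem di1_test_dead (b : Nat) (hb : b ≤ 12) (h : (12#32).toInt < (BitVec.ofNat 32 b).toInt) : False := by
  have e12 : (12#32).toInt = 12 := by decide
  rw [cnt32_toInt b (by omega), e12] at h
  omega

end Gif.Spec.DGifDecompressInput_1

/-- Segment 1 of `DGifDecompressInput` (1067EBH … 106807H; dgif_lib.c:1073-1078): the checked load of `GifFile->Private`, the checked
load of `RunningBits`, the test `RunningBits > LZ_BITS` (dead by `LZOK.bits_hi`), to the head of the fill loop. -/
theorem Gif.Spec.Proved.DGifDecompressInput_1_ok : Gif.Spec.DGifDecompressInput_1.Statement := by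
  intro Lay hLay μ hμ u₀ hcode h_load8 h_load4 h_store4 H rest frames F R e ret v hat
  obtain ⟨hbody, c_rdi, hlz, hmu⟩ := hat
  -- 1. THE PRELUDE: the entry's facts, the present state in the walker's names
  have he := hbody.entry
  v_entry he
  obtain ⟨henv, hlz0, hrdi, hout⟩ := hbody.pre
  have w_rip := hbody.rip
  have c_rsp : v.reg .rsp = e.reg .rsp - 120 := hbody.rsp
  have c_r13 : v.reg .r13 = e.reg .rdi := hbody.r13
  have w_kept : RegsKept [.rsp] v v := RegsKept.refl _ _
  have w_eq : Mem.EqOn ProgX.Base.L.textLo ProgX.Base.L.textHi u₀.mem v.mem := ProgX.Base.conv_code_eqOn hbody.code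
  have hdf := (show abiInv _ from hbody.abi).1
  have hmx := (show abiInv _ from hbody.abi).2
  have hsse := ProgX.Base.sseOK_of_abiInv hbody.abi
  -- the slots and the footprint that `Body` at the exit states again
  have k_r15 : v.mem.readLE (e.reg .rsp - 8) 8 = (e.reg .r15).toNat := hbody.slot_r15
  have k_r14 : v.mem.readLE (e.reg .rsp - 16) 8 = (e.reg .r14).toNat := hbody.slot_r14
  have k_r13 : v.mem.readLE (e.reg .rsp - 24) 8 = (e.reg .r13).toNat := hbody.slot_r13
  have k_r12 : v.mem.readLE (e.reg .rsp - 32) 8 = (e.reg .r12).toNat := hbody.slot_r12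
  have k_rbp : v.mem.readLE (e.reg .rsp - 40) 8 = (e.reg .rbp).toNat := hbody.slot_rbp
  have k_rbx : v.mem.readLE (e.reg .rsp - 48) 8 = (e.reg .rbx).toNat := hbody.slot_rbx
  have k_ra : UInt64.ofNat (v.mem.readLE (e.reg .rsp) 8) = ret := hbody.slot_ra
  have hsame : Mem.SameExcept
    [⟨(e.reg .rsp).toNat - 352, (e.reg .rsp).toNat⟩,
     shadowSpan ((e.reg .rsp).toNat - 120) ((e.reg .rsp).toNat - 56),
     ⟨F.pv + 20, F.pv + 32⟩,
     ⟨F.pv + 44, F.pv + 56⟩,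
     ⟨F.pv + 88, F.pv + 344⟩,
     ⟨(e.reg .rsi).toNat, (e.reg .rsi).toNat + 4⟩,
     ⟨F.gif + 96, F.gif + 100⟩,
     ⟨R.cur, R.cur + 8⟩] e.mem v.mem := hbody.same
  -- where the cursor, gif and pv are, as numbers (one inequality per hypothesis, no `% 16` clause)
  have hcur := henv.ctx.cursor_range henv.heap.inv.shadow
  have hbase := henv.heap.base
  have hgin := hbody.ok.owns.inside hbody.inv.heap (o := (F.gif, 120)) List.mem_cons_self
  have hpin := hbody.ok.owns.inside hbody.inv.heap (o := (F.pv, 24936)) (List.mem_cons_of_mem _ List.mem_cons_self)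
  simp only at hgin hpin
  rw [hbase] at hgin hpin
  obtain ⟨wg1, -, -, -, wg2⟩ := hgin
  obtain ⟨wp1, -, -, -, wp2⟩ := hpin
  -- 2. THE TWO LOADS, as facts about `v.mem` in the walker's form: `gif.Private = pv` (G2), `pv.RunningBits = b ≤ 12` (LZ4)
  have hpriv := hbody.ok.shape.priv
  simp only [gfield] at hpriv
  have l_priv : v.mem.readLE (e.reg .rdi + 0x70) 8 = F.pv := by
    rw [rd_eq_readLE v.mem (e.reg .rdi + 0x70) (F.gif + 112) 8 (by u_omega)]
    exact hpriv
  obtain ⟨b, hbdef⟩ : ∃ b, GifFilePrivateType.RunningBits v.mem F.pv = b := ⟨_, rfl⟩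
  have hb12 : b ≤ 12 := by
    rw [← hbdef]
    exact hlz.bits_hi
  have hbits := hbdef
  simp only [gfield] at hbits
  have l_bits : v.mem.readLE (UInt64.ofNat F.pv + 0x18) 4 = b := by
    rw [rd_eq_readLE v.mem (UInt64.ofNat F.pv + 0x18) (F.pv + 24) 4 (by u_omega)]
    exact hbits
  -- gif and pv are live under the body's frames: what the check goals ask
  have hgl : LiveIn (H.liveObjs ++ rest) (DGifDecompressInput.framesIn frames e) F.gif 120 :=
    hbody.ok.gif_live.liveIn rest _ (Nat.le_refl _) (Nat.le_refl _)
  have hpl : LiveIn (H.liveObjs ++ rest) (DGifDecompressInput.framesIn frames e) F.pv 24936 :=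
    hbody.ok.pv_live.liveIn rest _ (Nat.le_refl _) (Nat.le_refl _)
  -- 3. THE WALK, to the loop's head (and, on the dead arm of l.1078, to the epilogue)
  u_walk hcode [hμ.vendor] until [Gif.L.DGifDecompressInput.at_106807, Gif.L.DGifDecompressInput.at_106874]
    span [ProgX.Base.L.textLo, ProgX.Base.L.textHi] side (v_side)
  -- 4. THE CHECK GOALS
  case check_1067ef =>
    -- l.1073 the load of `GifFile->Private`: 8 bytes at gif + 112, inside gif (G1)
    have hun : ShadowUntouched v.mem s_1067ef.mem := by v_untouched
    exact hgl.accSmall hbody.inv.shadow hun _ 8 (by decide) (by u_omega) (by u_omega)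
  case check_1067fc =>
    -- l.1078 the load of `Private->RunningBits`: 4 bytes at pv + 24, inside pv (G2)
    have hun : ShadowUntouched v.mem s_1067fc.mem := by v_untouched
    exact hpl.accSmall hbody.inv.shadow hun _ 4 (by decide) (by u_omega) (by u_omega)
  case check_106862 =>
    -- l.1079 the store of `GifFile->Error` on the arm `RunningBits > 12`: the arm is dead (LZ4)
    exact absurd hbr_106805 (fun h => Gif.Spec.DGifDecompressInput_1.di1_test_dead b hb12 h)
  · -- 0x106874 from 0x10686f (l.1079-1080): the dead arm of the test
    exact absurd hbr_106805 (fun h => Gif.Spec.DGifDecompressInput_1.di1_test_dead b hb12 h)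
  · -- 0x106807 (l.1083): the head of the fill loop, `Head m` with `m = RunningBits − CrntShiftState`
    -- the one store since `v`: a check call's return address (stack, below the body's stack pointer)
    obtain ⟨hinvA, hokA, hremA⟩ := store_stack hbody.inv hbody.ok ⟨hcur.1, hcur.2.1⟩ (e.reg .rsp - 128) 8 1075201
      (by u_omega) (by u_omega)
    rw [← w_mem] at hinvA hokA hremA
    have hs : Mem.SameExcept [⟨(e.reg .rsp).toNat - 128, (e.reg .rsp).toNat - 120⟩] v.mem s_106805.mem := by
      rw [w_mem]
      u_same
    -- the LZW fields and the measure do not read the stack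
    have hlzA : LZOK s_106805.mem F.pv := by
      apply hlz.sameExcept hs (by omega)
      intro w hw
      have ew := List.mem_singleton.mp hw
      rw [ew]
      simp only
      omega
    have hmuA : mu R s_106805.mem F.pv = mu R v.mem F.pv := by
      apply mu_sameExcept hs (by omega) (by omega)
      · intro w hw
        have ew := List.mem_singleton.mp hw
        rw [ew]
        simp only
        omega
      · intro w hw
        have ew := List.mem_singleton.mp hw
        rw [ew]
        simp only
        omega
      · intro w hw
        have ew := List.mem_singleton.mp hw
        rw [ew]
        simp only
        omega
    -- THE EXIT ASSERTION: `Body` at 0x106807 …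
    have hbody1 : DGifDecompressInput.Body Gif.L.DGifDecompressInput.at_106807 H rest frames F R u₀ e ret s_106805 := {
      entry := hbody.entry
      pre := hbody.pre
      rip := w_rip
      rsp := w_rsp
      r13 := (w_kept.get .r13 rfl).trans hbody.r13
      r15 := (w_kept.get .r15 rfl).trans hbody.r15
      r14 := (w_kept.get .r14 rfl).trans hbody.r14
      slot_r15 := by
        rw [w_mem]
        u_frame k_r15
      slot_r14 := by
        rw [w_mem]
        u_frame k_r14
      slot_r13 := by
        rw [w_mem]
        u_frame k_r13
      slot_r12 := by
        rw [w_mem]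
        u_frame k_r12
      slot_rbp := by
        rw [w_mem]
        u_frame k_rbp
      slot_rbx := by
        rw [w_mem]
        u_frame k_rbx
      slot_ra := by
        rw [w_mem]
        u_frame k_ra
      inv := hinvA
      ok := hokA
      rem := by
        rw [hremA]
        exact hbody.rem
      same := by
        rw [w_mem]
        u_same
      code := ProgX.Base.conv_code_in w_eq
      abi := by
        refine ProgX.Base.abiInv_of ?_ ?_
        · rw [w_flags]
          simp only [X86.User.df_setStatus]
          exact w_df_1067fc
        · rw [w_mxcsr]
          exact hmx
    }
    -- … `rbx = Private`, the loop's form of the LZW ranges, SOME round measure, the function's measure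
    refine ReachVia.done ?_
    refine Or.inl ⟨GifFilePrivateType.RunningBits s_106805.mem F.pv - GifFilePrivateType.CrntShiftState s_106805.mem F.pv, ?_⟩
    exact {
      body := hbody1
      rbx := by
        rw [w_rbx]
        exact toNat_ofNat_addr F.pv (by omega)
      lz := DGifDecompressInput.LZLoop.of_ok hlzA
      measure := rfl
      mu_le := by
        rw [hmuA]
        exact hmu
    }
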